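-- pv_equiv track=rewrite | github.com/sharath112705-pixel/dna-dfa-app | app.py | colored_highlight_text
-- ===== SOURCE A (Python) =====
-- PATTERN_COLORS = ['#A7F3D0', '#FDE68A', '#C7B3FF', '#FBCFE8', '#93C5FD', '#FDBA74']
--
-- def colored_highlight_text(dna, matches_by_pattern):
--     """
--     matches_by_pattern: list of lists of (start,end) per pattern
--     produce a string with colored spans; patterns earlier in list get colors[0], etc.
--     Overlaps: priority to earlier patterns in the list.
--     """
--     n = len(dna)
--     owner = [None] * n
--     for pid, matches in enumerate(matches_by_pattern):
--         for (a,b) in matches: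
--             for i in range(a, b+1):
--                 if owner[i] is None:
--                     owner[i] = pid
--     parts = []
--     i = 0
--     while i < n:
--         if owner[i] is None:
--             parts.append(dna[i])
--             i += 1
--         else:
--             pid = owner[i]
--             color = PATTERN_COLORS[pid % len(PATTERN_COLORS)]
--             j = i
--             while j < n and owner[j] == pid:
--                 j += 1
--             # span from i to j-1
--             segment = dna[i:j]
--             parts.append(f"<span class='match-highlight' style='background:{color};'>{segment}</span>")
--             i = j
--     return "<div class='sequence-box'>" + "".join(parts) + "</div>"
-- ===== SOURCE B (Python) =====
-- from itertools import groupby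
--
-- PATTERN_COLORS = ['#A7F3D0', '#FDE68A', '#C7B3FF', '#FBCFE8', '#93C5FD', '#FDBA74']
--
-- def colored_highlight_text(dna, matches_by_pattern):
--     """Different strategy: no owner array is painted at all. The owner of a
--     position is a pure query (the first pattern with a match covering it), and
--     itertools.groupby over the positions chops the string into maximal
--     same-owner runs, each rendered in one shot."""
--     def owner(i):
--         for pid, ms in enumerate(matches_by_pattern):
--             if any(a <= i <= b for (a, b) in ms):
--                 return pid
--         return None
--
--     parts = []
--     for pid, run in groupby(range(len(dna)), key=owner):
--         run = list(run)
--         seg = dna[run[0]:run[-1] + 1]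
--         if pid is None:
--             parts.append(seg)
--         else:
--             color = PATTERN_COLORS[pid % len(PATTERN_COLORS)]
--             parts.append(f"<span class='match-highlight' style='background:{color};'>{seg}</span>")
--     return "<div class='sequence-box'>" + "".join(parts) + "</div>"
-- ===== Notes on version B (the rewrite author's own statement) =====
-- stated objective: alternative
-- what changed: B drops A's mutable owner array entirely: ownership of a position is a pure query (first pattern whose match covers it) and itertools.groupby over the position range chops the string into maximal same-owner runs, replacing A's match-by-match array stamping plus hand-written nested while-loop run scan.
import Mathlib
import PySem

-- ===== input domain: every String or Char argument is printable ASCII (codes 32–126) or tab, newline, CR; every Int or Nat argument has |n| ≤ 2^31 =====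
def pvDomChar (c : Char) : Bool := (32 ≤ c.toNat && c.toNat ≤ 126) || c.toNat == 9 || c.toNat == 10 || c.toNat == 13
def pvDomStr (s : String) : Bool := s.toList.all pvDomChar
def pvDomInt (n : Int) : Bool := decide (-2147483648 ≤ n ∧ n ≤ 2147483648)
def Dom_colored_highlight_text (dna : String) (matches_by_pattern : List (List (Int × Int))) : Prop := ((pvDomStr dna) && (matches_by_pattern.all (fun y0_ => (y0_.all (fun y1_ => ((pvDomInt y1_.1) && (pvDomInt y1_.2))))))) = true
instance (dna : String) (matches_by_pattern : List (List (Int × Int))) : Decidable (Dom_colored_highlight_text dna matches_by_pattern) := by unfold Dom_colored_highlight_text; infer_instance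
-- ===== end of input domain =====

-- B drops A's mutable owner array: ownership of a position is a pure query (first pattern whose
-- match covers it) and a groupby over the position range chops the string into maximal same-owner
-- runs (objective: alternative, similar cost); equivalence proved on in-range matches.

def PATTERN_COLORS : List String :=
  ["#A7F3D0", "#FDE68A", "#C7B3FF", "#FBCFE8", "#93C5FD", "#FDBA74"]

-- the f-string both Pythons contain verbatim
def pvSpan (color seg : String) : String :=
  "<span class='match-highlight' style='background:" ++ color ++ ";'>" ++ seg ++ "</span>"

-- PATTERN_COLORS[pid % len(PATTERN_COLORS)] (pid ≥ 0 always, so pyGetD is in range)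
def pvColor (pid : Int) : String :=
  PySem.List.pyGetD PATTERN_COLORS (PySem.Int.mod pid (PySem.List.len PATTERN_COLORS)) ""

-- ===== PORT A =====
-- 'if owner[i] is None: owner[i] = pid'; Python raises IndexError for i outside [-n, n) —
-- exactly those inputs are excluded by Pre_, so the total forms pyGetD/pySetD are exact here.
def pvStampPos (owner : List (Option Int)) (pid i : Int) : List (Option Int) :=
  if PySem.List.pyGetD owner i none = none then PySem.List.pySetD owner i (some pid) else owner

-- 'for i in range(a, b+1): …'
def pvStampMatch (owner : List (Option Int)) (pid : Int) (m : Int × Int) : List (Option Int) :=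
  (PySem.List.pyRange m.1 (m.2 + 1) 1).foldl (fun o i => pvStampPos o pid i) owner

-- 'owner = [None]*n; for pid, matches in enumerate(...): for (a,b) in matches: …'
def pvOwnerArr (n : Nat) (mps : List (List (Int × Int))) : List (Option Int) :=
  (PySem.List.enumerate mps 0).foldl
    (fun o pm => pm.2.foldl (fun o' m => pvStampMatch o' pm.1 m) o)
    (List.replicate n none)

-- inner 'while j < n and owner[j] == pid: j += 1' (fuel n - j suffices: j only increases)
def pvScanA (owner : List (Option Int)) (pid : Int) : Nat → Int → Int
  | 0, j => j
  | f+1, j =>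
      if j < (owner.length : Int) ∧ PySem.List.pyGetD owner j none = some pid
      then pvScanA owner pid f (j + 1) else j

-- outer 'while i < n' building parts (fuel n suffices: i strictly increases each iteration)
def pvLoopA (dna : List Char) (owner : List (Option Int)) : Nat → Int → List String → List String
  | 0, _, parts => parts
  | f+1, i, parts =>
      if i < (dna.length : Int) then
        match PySem.List.pyGetD owner i none with
        | none => pvLoopA dna owner f (i + 1) (parts ++ [String.ofList [PySem.List.pyGetD dna i ' ']])
        | some pid =>
            let j := pvScanA owner pid (dna.length - i.toNat) i
            pvLoopA dna owner f j
              (parts ++ [pvSpan (pvColor pid) (String.ofList (PySem.List.slice dna (some i) (some j)))])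
      else parts

def colored_highlight_text (dna : String) (matches_by_pattern : List (List (Int × Int))) : String :=
  let owner := pvOwnerArr dna.toList.length matches_by_pattern
  "<div class='sequence-box'>"
    ++ PySem.Str.join "" (pvLoopA dna.toList owner dna.toList.length 0 [])
    ++ "</div>"

-- ===== PORT B =====
-- 'def owner(i): for pid, ms in enumerate(matches_by_pattern): if any(a <= i <= b …): return pid'
def pvOwnerQAux (pms : List (Int × List (Int × Int))) (i : Int) : Option Int :=
  match pms with
  | [] => none
  | pm :: rest =>
      if pm.2.any (fun m => decide (m.1 ≤ i ∧ i ≤ m.2)) then some pm.1 else pvOwnerQAux rest i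

def pvOwnerQ (mps : List (List (Int × Int))) (i : Int) : Option Int :=
  pvOwnerQAux (PySem.List.enumerate mps 0) i

-- itertools.groupby(positions, key=f) with each group materialised, as B does with list(run)
def pvGroupRuns (f : Int → Option Int) : List Int → List (Option Int × List Int)
  | [] => []
  | x :: xs =>
      (f x, x :: xs.takeWhile (fun y => f y == f x)) ::
        pvGroupRuns f (xs.dropWhile (fun y => f y == f x))
  termination_by l => l.length
  decreasing_by simpa using Nat.lt_succ_of_le (List.length_dropWhile_le _ _)

-- the body of B's for-loop: seg = dna[run[0]:run[-1]+1]; plain seg or a colored span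
def pvChunk (dna : List Char) (pr : Option Int × List Int) : String :=
  let seg := String.ofList
    (PySem.List.slice dna (some (pr.2.headD 0)) (some (pr.2.getLastD 0 + 1)))
  match pr.1 with
  | none => seg
  | some pid => pvSpan (pvColor pid) seg

def colored_highlight_text_alt (dna : String) (matches_by_pattern : List (List (Int × Int))) : String :=
  "<div class='sequence-box'>"
    ++ PySem.Str.join ""
        ((pvGroupRuns (pvOwnerQ matches_by_pattern)
            (PySem.List.pyRange 0 dna.toList.length 1)).map (pvChunk dna.toList))
    ++ "</div>"

-- ===== PRECONDITION & SPEC =====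
-- Pre_ excludes inputs with a nonempty match (a,b), a ≤ b, reaching outside [0, len(dna)):
-- outside that natural domain A either raises IndexError (index < -n or ≥ n) or colors
-- positions picked by Python's negative-index wraparound, an artefact of the owner-array indexing.
def Pre_colored_highlight_text (dna : String) (matches_by_pattern : List (List (Int × Int))) : Prop :=
  ∀ ms ∈ matches_by_pattern, ∀ m ∈ ms, m.1 ≤ m.2 → 0 ≤ m.1 ∧ m.2 < (dna.toList.length : Int)
instance (dna : String) (matches_by_pattern : List (List (Int × Int))) : Decidable (Pre_colored_highlight_text dna matches_by_pattern) := by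
  unfold Pre_colored_highlight_text; infer_instance

def pvWitness_colored_highlight_text : String × (List (List (Int × Int))) :=
  ("ACGT", [[(0, 1)], [(1, 2)]])

def Spec_colored_highlight_text (dna : String) (matches_by_pattern : List (List (Int × Int))) (out : String) : Prop := out = colored_highlight_text_alt dna matches_by_pattern
instance (dna : String) (matches_by_pattern : List (List (Int × Int))) (out : String) : Decidable (Spec_colored_highlight_text dna matches_by_pattern out) := by unfold Spec_colored_highlight_text; infer_instance

-- ===== CLAIM (what is proved, stated in full; the proofs are below) =====
def Claim_equal_colored_highlight_text : Prop := ∀ (dna : String) (matches_by_pattern : List (List (Int × Int))), Dom_colored_highlight_text dna matches_by_pattern → Pre_colored_highlight_text dna matches_by_pattern → Spec_colored_highlight_text dna matches_by_pattern (colored_highlight_text dna matches_by_pattern)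

-- ===== LEMMAS AND PROOFS =====

-- proof-side spec of both owner computations: the first pattern (counting from s) covering i
def pvFirstCover (mps : List (List (Int × Int))) (s i : Int) : Option Int :=
  match mps with
  | [] => none
  | ms :: rest =>
      if ms.any (fun m => decide (m.1 ≤ i ∧ i ≤ m.2)) then some s else pvFirstCover rest (s + 1) i

theorem pv_intersperse_nil_flatten (xs : List (List Char)) :
    (List.intersperse ([] : List Char) xs).flatten = xs.flatten := by
  induction xs with
  | nil => simp
  | cons h t ih =>
    cases t with
    | nil => simp
    | cons h2 t2 => simp_all [List.intersperse]

theorem pv_join_nil : PySem.Str.join "" [] = "" := by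
  simp [PySem.Str.join, PySem.Chars.join, List.intercalate]

theorem pv_join_cons (s : String) (xs : List String) :
    PySem.Str.join "" (s :: xs) = s ++ PySem.Str.join "" xs := by
  simp [PySem.Str.join, PySem.Chars.join, List.intercalate, pv_intersperse_nil_flatten]

theorem pv_join_append (xs : List String) (s : String) :
    PySem.Str.join "" (xs ++ [s]) = PySem.Str.join "" xs ++ s := by
  simp [PySem.Str.join, PySem.Chars.join, List.intercalate, pv_intersperse_nil_flatten]

-- ---- A-side: the stamped owner array reads back as pvFirstCover ----
theorem pv_stampPos_length (o : List (Option Int)) (p i : Int) :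
    (pvStampPos o p i).length = o.length := by
  unfold pvStampPos
  split
  · exact PySem.List.length_pySetD o i (some p)
  · rfl

theorem pv_stampPos_read (o : List (Option Int)) (p i k : Int)
    (hi : 0 ≤ i) (hi2 : i < (o.length : Int)) (hk : 0 ≤ k) (_hk2 : k < (o.length : Int)) :
    PySem.List.pyGetD (pvStampPos o p i) k none =
      if PySem.List.pyGetD o i none = none ∧ k = i then some p
      else PySem.List.pyGetD o k none := by
  unfold pvStampPos
  by_cases h : PySem.List.pyGetD o i none = none
  · rw [if_pos h]
    have hi' : ((i.toNat : Int)) = i := Int.toNat_of_nonneg hi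
    have hk' : ((k.toNat : Int)) = k := Int.toNat_of_nonneg hk
    rw [← hi', ← hk',
      PySem.List.pyGetD_pySetD_natCast o i.toNat k.toNat (some p) none (by omega)]
    have hmi : max i 0 = i := by omega
    have hmk : max k 0 = k := by omega
    by_cases h2 : k = i
    · subst h2; simp [h, hmk]
    · have hne : ¬ (k.toNat = i.toNat) := by omega
      simp [hne, h2, hk', hmi, h]
  · rw [if_neg h]
    have : ¬ (PySem.List.pyGetD o i none = none ∧ k = i) := by
      intro hcon; exact h hcon.1
    rw [if_neg this]

theorem pv_rangeFold_read (L : List Int) (o : List (Option Int)) (p k : Int)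
    (hL : ∀ x ∈ L, 0 ≤ x ∧ x < (o.length : Int)) (hk : 0 ≤ k) (hk2 : k < (o.length : Int)) :
    PySem.List.pyGetD (L.foldl (fun o i => pvStampPos o p i) o) k none =
      if PySem.List.pyGetD o k none = none ∧ k ∈ L then some p
      else PySem.List.pyGetD o k none := by
  induction L generalizing o with
  | nil => simp
  | cons i L ih =>
    simp only [List.foldl_cons]
    have hi := hL i (by simp)
    have hlen : (pvStampPos o p i).length = o.length := pv_stampPos_length o p i
    rw [ih (pvStampPos o p i)
      (by rw [hlen]; intro x hx; exact hL x (List.mem_cons_of_mem _ hx))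
      (by rw [hlen]; exact hk2)]
    rw [pv_stampPos_read o p i k hi.1 hi.2 hk hk2]
    by_cases h1 : PySem.List.pyGetD o k none = none <;>
      by_cases h2 : k = i <;>
      by_cases h3 : PySem.List.pyGetD o i none = none <;>
      simp_all [List.mem_cons]

theorem pv_stampMatch_length (o : List (Option Int)) (p : Int) (m : Int × Int) :
    (pvStampMatch o p m).length = o.length := by
  unfold pvStampMatch
  generalize PySem.List.pyRange m.1 (m.2 + 1) 1 = L
  induction L generalizing o with
  | nil => rfl
  | cons i L ih => simp only [List.foldl_cons]; rw [ih, pv_stampPos_length]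

theorem pv_stampMatch_read (o : List (Option Int)) (p : Int) (m : Int × Int) (k : Int)
    (hm : m.1 ≤ m.2 → 0 ≤ m.1 ∧ m.2 < (o.length : Int)) (hk : 0 ≤ k) (hk2 : k < (o.length : Int)) :
    PySem.List.pyGetD (pvStampMatch o p m) k none =
      if PySem.List.pyGetD o k none = none ∧ (m.1 ≤ k ∧ k ≤ m.2) then some p
      else PySem.List.pyGetD o k none := by
  unfold pvStampMatch
  rw [pv_rangeFold_read _ o p k
    (by intro x hx; rw [PySem.List.mem_pyRange_one] at hx
        have := hm (by omega); omega)
    hk hk2]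
  have hiff : (k ∈ PySem.List.pyRange m.1 (m.2 + 1) 1) ↔ (m.1 ≤ k ∧ k ≤ m.2) := by
    rw [PySem.List.mem_pyRange_one]; omega
  simp only [hiff]

theorem pv_patternFold_length (ms : List (Int × Int)) (o : List (Option Int)) (p : Int) :
    (ms.foldl (fun o' m => pvStampMatch o' p m) o).length = o.length := by
  induction ms generalizing o with
  | nil => rfl
  | cons m ms ih => simp only [List.foldl_cons]; rw [ih, pv_stampMatch_length]

theorem pv_patternFold_read (ms : List (Int × Int)) (o : List (Option Int)) (p k : Int)
    (hms : ∀ m ∈ ms, m.1 ≤ m.2 → 0 ≤ m.1 ∧ m.2 < (o.length : Int)) (hk : 0 ≤ k) (hk2 : k < (o.length : Int)) :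
    PySem.List.pyGetD (ms.foldl (fun o' m => pvStampMatch o' p m) o) k none =
      if PySem.List.pyGetD o k none = none ∧ ms.any (fun m => decide (m.1 ≤ k ∧ k ≤ m.2)) then some p
      else PySem.List.pyGetD o k none := by
  induction ms generalizing o with
  | nil => simp
  | cons m ms ih =>
    simp only [List.foldl_cons]
    have hlen : (pvStampMatch o p m).length = o.length := pv_stampMatch_length o p m
    rw [ih (pvStampMatch o p m)
      (by rw [hlen]; intro x hx; exact hms x (List.mem_cons_of_mem _ hx))
      (by rw [hlen]; exact hk2)]
    rw [pv_stampMatch_read o p m k (hms m (by simp)) hk hk2]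
    cases hok : PySem.List.pyGetD o k none with
    | some v => simp
    | none =>
      simp only [List.any_cons]
      cases hA : (ms.any fun m => decide (m.1 ≤ k ∧ k ≤ m.2)) <;>
        by_cases h2 : m.1 ≤ k ∧ k ≤ m.2 <;>
          simp [h2]

theorem pv_enumFold_length (mps : List (List (Int × Int))) (s : Int) (o : List (Option Int)) :
    ((PySem.List.enumerate mps s).foldl
      (fun o pm => pm.2.foldl (fun o' m => pvStampMatch o' pm.1 m) o) o).length = o.length := by
  induction mps generalizing s o with
  | nil => rfl
  | cons ms mps ih =>
    rw [PySem.List.enumerate_cons]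
    simp only [List.foldl_cons]
    rw [ih, pv_patternFold_length]

theorem pv_enumFold_read (mps : List (List (Int × Int))) (s : Int) (o : List (Option Int)) (k : Int)
    (hpre : ∀ ms ∈ mps, ∀ m ∈ ms, m.1 ≤ m.2 → 0 ≤ m.1 ∧ m.2 < (o.length : Int))
    (hk : 0 ≤ k) (hk2 : k < (o.length : Int)) :
    PySem.List.pyGetD ((PySem.List.enumerate mps s).foldl
        (fun o pm => pm.2.foldl (fun o' m => pvStampMatch o' pm.1 m) o) o) k none
      = (PySem.List.pyGetD o k none).or (pvFirstCover mps s k) := by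
  induction mps generalizing s o with
  | nil => simp [pvFirstCover]
  | cons ms mps ih =>
    rw [PySem.List.enumerate_cons]
    simp only [List.foldl_cons]
    have hlen : (ms.foldl (fun o' m => pvStampMatch o' s m) o).length = o.length :=
      pv_patternFold_length ms o s
    rw [ih (s + 1) _
      (by rw [hlen]; intro ms' hms'; exact hpre ms' (List.mem_cons_of_mem _ hms'))
      (by rw [hlen]; exact hk2)]
    rw [pv_patternFold_read ms o s k (hpre ms (by simp)) hk hk2]
    show _ = (PySem.List.pyGetD o k none).or
      (if ms.any (fun m => decide (m.1 ≤ k ∧ k ≤ m.2)) then some s else pvFirstCover mps (s + 1) k)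
    cases hok : PySem.List.pyGetD o k none with
    | some v => simp
    | none =>
      cases hA : (ms.any fun m => decide (m.1 ≤ k ∧ k ≤ m.2)) <;> simp

theorem pv_ownerArr_length (n : Nat) (mps : List (List (Int × Int))) :
    (pvOwnerArr n mps).length = n := by
  unfold pvOwnerArr; rw [pv_enumFold_length]; simp

theorem pv_ownerArr_read (n : Nat) (mps : List (List (Int × Int))) (k : Int)
    (hpre : ∀ ms ∈ mps, ∀ m ∈ ms, m.1 ≤ m.2 → 0 ≤ m.1 ∧ m.2 < (n : Int))
    (hk : 0 ≤ k) (hk2 : k < (n : Int)) :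
    PySem.List.pyGetD (pvOwnerArr n mps) k none = pvFirstCover mps 0 k := by
  unfold pvOwnerArr
  rw [pv_enumFold_read mps 0 (List.replicate n none) k (by simpa using hpre) hk (by simpa using hk2)]
  have hrep : PySem.List.pyGetD (List.replicate n (none : Option Int)) k none = none := by
    rw [PySem.List.pyGetD_eq_getElem _ _ hk (by simpa using hk2)]
    simp
  rw [hrep]
  rfl

-- ---- B-side: the owner query is pvFirstCover ----
theorem pv_ownerQAux_eq (mps : List (List (Int × Int))) (s i : Int) :
    pvOwnerQAux (PySem.List.enumerate mps s) i = pvFirstCover mps s i := by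
  induction mps generalizing s with
  | nil => rfl
  | cons ms mps ih =>
    rw [PySem.List.enumerate_cons]
    show (if ms.any (fun m => decide (m.1 ≤ i ∧ i ≤ m.2)) then some s
          else pvOwnerQAux (PySem.List.enumerate mps (s + 1)) i) = _
    rw [ih (s + 1)]
    rfl

-- ---- run-end machinery (fueled, mirroring the fueled while-loops) ----
def pvRunEndF (g : Int → Option Int) (n : Nat) (k : Option Int) : Nat → Nat → Nat
  | 0, t => t
  | f+1, t => if t < n ∧ g t = k then pvRunEndF g n k f (t + 1) else t

theorem pv_runEndF_ge (g : Int → Option Int) (n : Nat) (k : Option Int) :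
    ∀ (f t : Nat), t ≤ pvRunEndF g n k f t := by
  intro f
  induction f with
  | zero => intro t; exact le_refl t
  | succ f ih =>
    intro t
    show t ≤ (if t < n ∧ g t = k then pvRunEndF g n k f (t + 1) else t)
    split
    · exact le_trans (by omega) (ih (t + 1))
    · exact le_refl t

theorem pv_runEndF_le (g : Int → Option Int) (n : Nat) (k : Option Int) :
    ∀ (f t : Nat), t ≤ n → pvRunEndF g n k f t ≤ n := by
  intro f
  induction f with
  | zero => intro t h; exact h
  | succ f ih =>
    intro t h
    show (if t < n ∧ g t = k then pvRunEndF g n k f (t + 1) else t) ≤ n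
    split
    · rename_i hc; exact ih (t + 1) (by omega)
    · exact h

-- the A-side scan computes the same run end
theorem pv_scanA_runEnd (oa : List (Option Int)) (pid : Int) :
    ∀ (f : Nat) (t : Nat),
      pvScanA oa pid f (t : Int)
        = (pvRunEndF (fun y => PySem.List.pyGetD oa y none) oa.length (some pid) f t : Int) := by
  intro f
  induction f with
  | zero => intro t; rfl
  | succ f ih =>
    intro t
    show (if (t : Int) < (oa.length : Int) ∧ PySem.List.pyGetD oa (t : Int) none = some pid
          then pvScanA oa pid f ((t : Int) + 1) else (t : Int)) = _
    show _ = ((if t < oa.length ∧ PySem.List.pyGetD oa (t : Int) none = some pid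
          then pvRunEndF (fun y => PySem.List.pyGetD oa y none) oa.length (some pid) f (t + 1) else t : Nat) : Int)
    by_cases hc : t < oa.length ∧ PySem.List.pyGetD oa (t : Int) none = some pid
    · rw [if_pos ⟨by exact_mod_cast hc.1, hc.2⟩, if_pos hc]
      have : ((t : Int) + 1) = ((t + 1 : Nat) : Int) := by push_cast; ring
      rw [this, ih (t + 1)]
    · rw [if_neg (by intro h; exact hc ⟨by exact_mod_cast h.1, h.2⟩), if_neg hc]

-- fuel irrelevance: any fuel ≥ n - t gives the same run end
theorem pv_runEndF_fuel (g : Int → Option Int) (n : Nat) (k : Option Int) :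
    ∀ (f1 f2 t : Nat), n - t ≤ f1 → n - t ≤ f2 →
      pvRunEndF g n k f1 t = pvRunEndF g n k f2 t := by
  intro f1
  induction f1 with
  | zero =>
    intro f2 t h1 h2
    cases f2 with
    | zero => rfl
    | succ f2 =>
      show t = (if t < n ∧ g t = k then pvRunEndF g n k f2 (t + 1) else t)
      rw [if_neg (by intro h; omega)]
  | succ f1 ih =>
    intro f2 t h1 h2
    show (if t < n ∧ g t = k then pvRunEndF g n k f1 (t + 1) else t) = _
    by_cases hc : t < n ∧ g (t : Int) = k
    · cases f2 with
      | zero => omega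
      | succ f2 =>
        rw [if_pos hc]
        show _ = (if t < n ∧ g t = k then pvRunEndF g n k f2 (t + 1) else t)
        rw [if_pos hc]
        exact ih f2 (t + 1) (by omega) (by omega)
    · cases f2 with
      | zero => rw [if_neg hc]; rfl
      | succ f2 =>
        rw [if_neg hc]
        show _ = (if t < n ∧ g t = k then pvRunEndF g n k f2 (t + 1) else t)
        rw [if_neg hc]

-- takeWhile/dropWhile over a contiguous range stop exactly at the run end
theorem pv_tw_dw (g : Int → Option Int) (n : Nat) (k : Option Int) :
    ∀ (f t : Nat), t ≤ n → n - t ≤ f →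
      ((PySem.List.pyRange t n 1).takeWhile (fun y => g y == k)
          = PySem.List.pyRange t (pvRunEndF g n k f t) 1)
      ∧ ((PySem.List.pyRange t n 1).dropWhile (fun y => g y == k)
          = PySem.List.pyRange (pvRunEndF g n k f t) n 1) := by
  intro f
  induction f with
  | zero =>
    intro t htn hf
    have : t = n := by omega
    subst this
    simp [PySem.List.pyRange_one_eq_nil (le_refl (t : Int)), pvRunEndF]
  | succ f ih =>
    intro t htn hf
    by_cases htn' : t < n
    · have hcons : PySem.List.pyRange (t : Int) (n : Int) 1
          = (t : Int) :: PySem.List.pyRange ((t : Int) + 1) (n : Int) 1 :=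
        PySem.List.pyRange_one_cons (by exact_mod_cast htn')
      have hcast : ((t : Int) + 1) = ((t + 1 : Nat) : Int) := by push_cast; ring
      by_cases hg : g (t : Int) = k
      · have hbeq : (g ((t : Nat) : Int) == k) = true := by simp [hg]
        have hre : pvRunEndF g n k (f + 1) t = pvRunEndF g n k f (t + 1) := by
          show (if t < n ∧ g t = k then pvRunEndF g n k f (t + 1) else t) = _
          rw [if_pos ⟨htn', hg⟩]
        have ihh := ih (t + 1) (by omega) (by omega)
        have hge : t + 1 ≤ pvRunEndF g n k f (t + 1) := pv_runEndF_ge g n k f (t + 1)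
        refine ⟨?_, ?_⟩
        · rw [hcons, List.takeWhile_cons, hbeq, if_pos rfl, hcast, ihh.1, hre]
          rw [show ((t + 1 : Nat) : Int) = (t : Int) + 1 from hcast.symm]
          exact (PySem.List.pyRange_one_cons
            (by exact_mod_cast (by omega : t < pvRunEndF g n k f (t + 1)))).symm
        · rw [hcons, List.dropWhile_cons, hbeq, if_pos rfl, hcast, ihh.2, hre]
      · have hbeq : (g ((t : Nat) : Int) == k) = false := by simp [hg]
        have hre : pvRunEndF g n k (f + 1) t = t := by
          show (if t < n ∧ g t = k then pvRunEndF g n k f (t + 1) else t) = t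
          rw [if_neg (by intro h; exact hg h.2)]
        refine ⟨?_, ?_⟩
        · rw [hcons, List.takeWhile_cons, hbeq, if_neg (by simp), hre]
          exact (PySem.List.pyRange_one_eq_nil (le_refl ((t : Nat) : Int))).symm
        · rw [hcons, List.dropWhile_cons, hbeq, if_neg (by simp), hre]
          exact hcons.symm
    · have ht : t = n := by omega
      subst ht
      have hre : pvRunEndF g t k (f + 1) t = t := by
        show (if t < t ∧ g t = k then pvRunEndF g t k f (t + 1) else t) = t
        rw [if_neg (by intro h; omega)]
      rw [hre, PySem.List.pyRange_one_eq_nil (le_refl ((t : Nat) : Int))]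
      exact ⟨rfl, rfl⟩

-- first group of pvGroupRuns on a contiguous range
theorem pv_groupRuns_first (g : Int → Option Int) (n t : Nat) (ht : t < n) :
    pvGroupRuns g (PySem.List.pyRange t n 1)
      = (g t, PySem.List.pyRange t (pvRunEndF g n (g t) (n - (t + 1)) (t + 1)) 1)
        :: pvGroupRuns g (PySem.List.pyRange (pvRunEndF g n (g t) (n - (t + 1)) (t + 1)) n 1) := by
  have hcast : ((t : Int) + 1) = ((t + 1 : Nat) : Int) := by push_cast; ring
  have htw := pv_tw_dw g n (g t) (n - (t + 1)) (t + 1) (by omega) (le_refl _)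
  have hge : t + 1 ≤ pvRunEndF g n (g t) (n - (t + 1)) (t + 1) :=
    pv_runEndF_ge g n (g t) _ (t + 1)
  rw [PySem.List.pyRange_one_cons (by exact_mod_cast ht)]
  rw [pvGroupRuns]
  rw [hcast, htw.1, htw.2]
  rw [show ((t + 1 : Nat) : Int) = (t : Int) + 1 from hcast.symm]
  rw [← PySem.List.pyRange_one_cons
    (by exact_mod_cast (by omega : t < pvRunEndF g n (g t) (n - (t + 1)) (t + 1)))]

-- takeWhile/dropWhile only look at the predicate on elements of the list
theorem pv_takeWhile_congr (p q : Int → Bool) :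
    ∀ (l : List Int), (∀ x ∈ l, p x = q x) → l.takeWhile p = l.takeWhile q := by
  intro l
  induction l with
  | nil => intro _; rfl
  | cons z zs ih =>
    intro h
    rw [List.takeWhile_cons, List.takeWhile_cons, h z (by simp),
      ih (fun y hy => h y (List.mem_cons_of_mem _ hy))]

theorem pv_dropWhile_congr (p q : Int → Bool) :
    ∀ (l : List Int), (∀ x ∈ l, p x = q x) → l.dropWhile p = l.dropWhile q := by
  intro l
  induction l with
  | nil => intro _; rfl
  | cons z zs ih =>
    intro h
    rw [List.dropWhile_cons, List.dropWhile_cons, h z (by simp),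
      ih (fun y hy => h y (List.mem_cons_of_mem _ hy))]

-- pvGroupRuns only looks at the key on elements of the list
theorem pv_groupRuns_congr (f f' : Int → Option Int) :
    ∀ (l : List Int), (∀ x ∈ l, f x = f' x) → pvGroupRuns f l = pvGroupRuns f' l := by
  intro l
  induction hn : l.length using Nat.strong_induction_on generalizing l with
  | _ n ih =>
    cases l with
    | nil => intro _; rw [pvGroupRuns, pvGroupRuns]
    | cons x xs =>
      intro h
      rw [pvGroupRuns, pvGroupRuns]
      have hx : f x = f' x := h x (by simp)
      have hpq : ∀ y ∈ xs, ((fun y => f y == f x) y) = ((fun y => f' y == f' x) y) := by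
        intro y hy
        simp only [h y (List.mem_cons_of_mem _ hy), hx]
      have htw := pv_takeWhile_congr _ _ xs hpq
      have hdw := pv_dropWhile_congr _ _ xs hpq
      rw [htw, hdw, hx]
      cases n with
      | zero => simp at hn
      | succ n =>
        have hle : (xs.dropWhile (fun y => f' y == f' x)).length ≤ xs.length :=
          List.length_dropWhile_le _ _
        rw [ih (xs.dropWhile (fun y => f' y == f' x)).length
          (by simp at hn; omega) _ rfl
          (fun y hy => h y (List.mem_cons_of_mem _
              (List.Sublist.mem hy (List.dropWhile_sublist _))))]

-- slice of a contiguous run as an explicit chunk value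
theorem pv_chunk_val_none (dna : List Char) (t j : Nat) (htj : t < j) :
    pvChunk dna (none, PySem.List.pyRange t j 1)
      = String.ofList ((dna.drop t).take (j - t)) := by
  have hcons : PySem.List.pyRange t j 1 = (t : Int) :: PySem.List.pyRange ((t : Int) + 1) j 1 :=
    PySem.List.pyRange_one_cons (by exact_mod_cast htj)
  have hhead : (PySem.List.pyRange t j 1).headD 0 = (t : Int) := by rw [hcons]; rfl
  have hlast : (PySem.List.pyRange t j 1).getLastD 0 = ((j : Int) - 1) := by
    have hj : (j : Int) = ((j - 1 : Nat) : Int) + 1 := by omega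
    have := PySem.List.pyRange_one_succ_right (a := (t : Int)) (b := ((j - 1 : Nat) : Int))
      (by omega)
    rw [hj, this, List.getLastD_concat]
    omega
  unfold pvChunk
  rw [hhead, hlast]
  have hj2 : (j : Int) - 1 + 1 = ((j : Nat) : Int) := by ring
  rw [hj2, PySem.List.slice_natCast]

theorem pv_chunk_val_some (dna : List Char) (pid : Int) (t j : Nat) (htj : t < j) :
    pvChunk dna (some pid, PySem.List.pyRange t j 1)
      = pvSpan (pvColor pid) (String.ofList ((dna.drop t).take (j - t))) := by
  have hcons : PySem.List.pyRange t j 1 = (t : Int) :: PySem.List.pyRange ((t : Int) + 1) j 1 :=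
    PySem.List.pyRange_one_cons (by exact_mod_cast htj)
  have hhead : (PySem.List.pyRange t j 1).headD 0 = (t : Int) := by rw [hcons]; rfl
  have hlast : (PySem.List.pyRange t j 1).getLastD 0 = ((j : Int) - 1) := by
    have hj : (j : Int) = ((j - 1 : Nat) : Int) + 1 := by omega
    have := PySem.List.pyRange_one_succ_right (a := (t : Int)) (b := ((j - 1 : Nat) : Int))
      (by omega)
    rw [hj, this, List.getLastD_concat]
    omega
  unfold pvChunk
  rw [hhead, hlast]
  have hj2 : (j : Int) - 1 + 1 = ((j : Nat) : Int) := by ring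
  rw [hj2, PySem.List.slice_natCast]

-- one character of dna as a slice
theorem pv_take_one (dna : List Char) (t : Nat) (ht : t < dna.length) :
    (dna.drop t).take 1 = [dna[t]] := by
  rw [List.drop_eq_getElem_cons ht]
  rfl

theorem pv_slice_split (dna : List Char) (t j : Nat) (ht : t < dna.length) (htj : t < j) :
    (dna.drop t).take (j - t) = dna[t] :: (dna.drop (t + 1)).take (j - (t + 1)) := by
  rw [List.drop_eq_getElem_cons ht]
  have : j - t = (j - (t + 1)) + 1 := by omega
  rw [this]
  rfl

-- rendered tail from position t, the quantity both loops produce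
def pvTail (dna : List Char) (g : Int → Option Int) (t : Nat) : String :=
  PySem.Str.join "" ((pvGroupRuns g (PySem.List.pyRange t dna.length 1)).map (pvChunk dna))

-- MAIN LEMMA: A's while-loop renders exactly the groupby chunks
theorem pv_main (dna : List Char) (oa : List (Option Int)) (hlen : oa.length = dna.length) :
    ∀ (f i : Nat) (parts : List String), dna.length - i ≤ f →
      PySem.Str.join "" (pvLoopA dna oa f (i : Int) parts)
        = PySem.Str.join "" parts
            ++ pvTail dna (fun y => PySem.List.pyGetD oa y none) i := by
  intro f
  set g : Int → Option Int := fun y => PySem.List.pyGetD oa y none with hg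
  induction f with
  | zero =>
    intro i parts hf
    have hni : dna.length ≤ i := by omega
    show PySem.Str.join "" parts = _
    unfold pvTail
    rw [PySem.List.pyRange_one_eq_nil (by exact_mod_cast hni), pvGroupRuns]
    rw [List.map_nil, pv_join_nil, String.append_empty]
  | succ f ih =>
    intro i parts hf
    by_cases hin : i < dna.length
    · show PySem.Str.join ""
        (if (i : Int) < (dna.length : Int) then
          match PySem.List.pyGetD oa (i : Int) none with
          | none => pvLoopA dna oa f ((i : Int) + 1) (parts ++ [String.ofList [PySem.List.pyGetD dna (i : Int) ' ']])
          | some pid =>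
              pvLoopA dna oa f (pvScanA oa pid (dna.length - (i : Int).toNat) (i : Int))
                (parts ++ [pvSpan (pvColor pid) (String.ofList (PySem.List.slice dna (some (i : Int))
                  (some (pvScanA oa pid (dna.length - (i : Int).toNat) (i : Int)))))])
        else parts) = _
      rw [if_pos (by exact_mod_cast hin)]
      have hchar : PySem.List.pyGetD dna (i : Int) ' ' = dna[i] :=
        PySem.List.pyGetD_eq_getElem dna _ (by omega) (by exact_mod_cast hin)
      have hcast1 : ((i : Int) + 1) = ((i + 1 : Nat) : Int) := by push_cast; ring
      have hG1 := pv_groupRuns_first g dna.length i hin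
      cases hOwn : PySem.List.pyGetD oa (i : Int) none with
      | none =>
        have hgi : g (i : Int) = none := hOwn
        rw [hgi] at hG1
        set jv := pvRunEndF g dna.length none (dna.length - (i + 1)) (i + 1) with hjv
        have hjge : i + 1 ≤ jv := hjv ▸ pv_runEndF_ge g dna.length none _ (i + 1)
        have hjle : jv ≤ dna.length := hjv ▸ pv_runEndF_le g dna.length none _ (i + 1) (by omega)
        rw [hchar, hcast1, ih (i + 1) _ (by omega), pv_join_append]
        unfold pvTail
        rw [hG1, List.map_cons, pv_join_cons, pv_chunk_val_none dna i jv (by omega)]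
        by_cases hstep : i + 1 < dna.length ∧ g ((i + 1 : Nat) : Int) = none
        · -- the none-run continues at i+1: peel the first group at i+1 as well
          have hG1' := pv_groupRuns_first g dna.length (i + 1) hstep.1
          rw [hstep.2] at hG1'
          have hjeq : pvRunEndF g dna.length none (dna.length - (i + 2)) (i + 2) = jv := by
            rw [hjv]
            have hfe : pvRunEndF g dna.length none (dna.length - (i + 1)) (i + 1)
                = pvRunEndF g dna.length none ((dna.length - (i + 2)) + 1) (i + 1) := by
              apply pv_runEndF_fuel <;> omega
            rw [hfe]
            show _ = (if i + 1 < dna.length ∧ g ((i + 1 : Nat) : Int) = none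
                      then pvRunEndF g dna.length none (dna.length - (i + 2)) (i + 2) else (i + 1))
            rw [if_pos hstep]
          rw [hjeq] at hG1'
          have hjge' : i + 2 ≤ jv := by
            rw [← hjeq]
            exact pv_runEndF_ge g dna.length none _ (i + 2)
          rw [hG1', List.map_cons, pv_join_cons, pv_chunk_val_none dna (i + 1) jv (by omega)]
          rw [show (dna.drop i).take (jv - i)
                = dna[i] :: (dna.drop (i + 1)).take (jv - (i + 1)) from
              pv_slice_split dna i jv hin (by omega)]
          rw [show (dna[i] :: (dna.drop (i + 1)).take (jv - (i + 1)))
                = [dna[i]] ++ (dna.drop (i + 1)).take (jv - (i + 1)) from rfl]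
          rw [String.ofList_append]
          simp only [String.append_assoc]
        · -- the run is the single position i: jv = i + 1
          have hjeq : jv = i + 1 := by
            rw [hjv]
            by_cases h1 : i + 1 < dna.length
            · have hfe : dna.length - (i + 1) = (dna.length - (i + 2)) + 1 := by omega
              rw [hfe]
              show (if i + 1 < dna.length ∧ g ((i + 1 : Nat) : Int) = none
                    then pvRunEndF g dna.length none (dna.length - (i + 2)) (i + 2) else (i + 1)) = i + 1
              rw [if_neg (by tauto)]
            · have hfe : dna.length - (i + 1) = 0 := by omega
              rw [hfe]
              rfl
          rw [hjeq]
          rw [show (i + 1) - i = 1 from by omega, pv_take_one dna i hin]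
          simp only [String.append_assoc]
      | some pid =>
        show PySem.Str.join ""
            (pvLoopA dna oa f (pvScanA oa pid (dna.length - ((i : Int)).toNat) (i : Int))
              (parts ++ [pvSpan (pvColor pid) (String.ofList (PySem.List.slice dna (some (i : Int))
                (some (pvScanA oa pid (dna.length - ((i : Int)).toNat) (i : Int)))))])) = _
        have hgi : g (i : Int) = some pid := hOwn
        rw [hgi] at hG1
        set jv := pvRunEndF g dna.length (some pid) (dna.length - (i + 1)) (i + 1) with hjv
        have hjge : i + 1 ≤ jv := hjv ▸ pv_runEndF_ge g dna.length (some pid) _ (i + 1)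
        have hjle : jv ≤ dna.length := hjv ▸ pv_runEndF_le g dna.length (some pid) _ (i + 1) (by omega)
        have hscan : pvScanA oa pid (dna.length - (i : Int).toNat) (i : Int) = ((jv : Nat) : Int) := by
          rw [show ((i : Int)).toNat = i from Int.toNat_natCast i]
          have h1 := pv_scanA_runEnd oa pid (dna.length - i) i
          rw [← hg, hlen] at h1
          rw [h1]
          congr 1
          rw [hjv]
          have hfe : dna.length - i = (dna.length - (i + 1)) + 1 := by omega
          rw [hfe]
          show (if i < dna.length ∧ g ((i : Nat) : Int) = some pid
                then pvRunEndF g dna.length (some pid) (dna.length - (i + 1)) (i + 1) else i) = _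
          rw [if_pos ⟨hin, hgi⟩]
        rw [hscan, ih jv _ (by omega), pv_join_append]
        unfold pvTail
        rw [hG1, List.map_cons, pv_join_cons, pv_chunk_val_some dna pid i jv (by omega)]
        rw [PySem.List.slice_natCast]
        simp only [String.append_assoc]
    · show PySem.Str.join ""
        (if (i : Int) < (dna.length : Int) then _ else parts) = _
      rw [if_neg (by exact_mod_cast hin)]
      unfold pvTail
      rw [PySem.List.pyRange_one_eq_nil (by exact_mod_cast (by omega : dna.length ≤ i)), pvGroupRuns]
      rw [List.map_nil, pv_join_nil, String.append_empty]

-- ===== VERDICT (by name: the statement is the Claim_ definition above) =====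
theorem colored_highlight_text_spec : Claim_equal_colored_highlight_text := by
  intro dna mps _ hpre
  unfold Spec_colored_highlight_text colored_highlight_text colored_highlight_text_alt
  unfold Pre_colored_highlight_text at hpre
  set n := dna.toList.length with hn
  set oa := pvOwnerArr n mps with hoa
  have hlen : oa.length = n := pv_ownerArr_length n mps
  have hmain := pv_main dna.toList oa (by rw [hlen]) n 0 [] (by omega)
  rw [Nat.cast_zero] at hmain
  rw [pv_join_nil, String.empty_append] at hmain
  show "<div class='sequence-box'>" ++ PySem.Str.join "" (pvLoopA dna.toList oa n 0 []) ++ "</div>" = _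
  rw [hmain]
  unfold pvTail
  simp only [Nat.cast_zero, ← hn]
  have hcongr : pvGroupRuns (fun y => PySem.List.pyGetD oa y none) (PySem.List.pyRange 0 (n : Int) 1)
      = pvGroupRuns (pvOwnerQ mps) (PySem.List.pyRange 0 (n : Int) 1) := by
    apply pv_groupRuns_congr
    intro y hy
    rw [PySem.List.mem_pyRange_one] at hy
    rw [hoa, pv_ownerArr_read n mps y hpre (by omega) (by omega)]
    unfold pvOwnerQ
    rw [pv_ownerQAux_eq]
  rw [hcongr]
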